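-- pv_equiv track=rewrite | github.com/Bumblebiber/hmem | hmem.py | _count_subtree_tokens
-- ===== SOURCE A (Python) =====
-- def estimate_tokens(text: str) -> int:
--     """Rough token estimate: ~4 characters per token (works for English/German mix)."""
--     return len(text) // 4 if text else 0
--
-- def _count_subtree_tokens(nodes: list[dict], children_map: dict[str, list[dict]]) -> int:
--     """Recursively count tokens for a list of nodes and their descendants."""
--     total = 0
--     for node in nodes:
--         total += estimate_tokens(node.get("content", ""))
--         grandchildren = children_map.get(node["id"], [])
--         if grandchildren:
--             total += _count_subtree_tokens(grandchildren, children_map)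
--     return total
-- ===== SOURCE B (Python) =====
-- def estimate_tokens(text: str) -> int:
--     """Rough token estimate: ~4 characters per token (works for English/German mix)."""
--     return len(text) // 4 if text else 0
--
-- def _count_subtree_tokens(nodes: list[dict], children_map: dict[str, list[dict]]) -> int:
--     """Iteratively count tokens for a list of nodes and their descendants
--     using an explicit worklist stack instead of recursion."""
--     total = 0
--     stack = list(nodes)
--     while stack:
--         node = stack.pop()
--         total += estimate_tokens(node.get("content", ""))
--         stack.extend(children_map.get(node["id"], []))
--     return total
-- ===== Notes on version B (the rewrite author's own statement) =====
-- stated objective: alternative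
-- what changed: Replaces A's recursive descent over children_map with an iterative traversal that maintains an explicit worklist stack (pop a node, add its estimate, push its children); addition is commutative so the different visiting order yields the same total.
import Mathlib
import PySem

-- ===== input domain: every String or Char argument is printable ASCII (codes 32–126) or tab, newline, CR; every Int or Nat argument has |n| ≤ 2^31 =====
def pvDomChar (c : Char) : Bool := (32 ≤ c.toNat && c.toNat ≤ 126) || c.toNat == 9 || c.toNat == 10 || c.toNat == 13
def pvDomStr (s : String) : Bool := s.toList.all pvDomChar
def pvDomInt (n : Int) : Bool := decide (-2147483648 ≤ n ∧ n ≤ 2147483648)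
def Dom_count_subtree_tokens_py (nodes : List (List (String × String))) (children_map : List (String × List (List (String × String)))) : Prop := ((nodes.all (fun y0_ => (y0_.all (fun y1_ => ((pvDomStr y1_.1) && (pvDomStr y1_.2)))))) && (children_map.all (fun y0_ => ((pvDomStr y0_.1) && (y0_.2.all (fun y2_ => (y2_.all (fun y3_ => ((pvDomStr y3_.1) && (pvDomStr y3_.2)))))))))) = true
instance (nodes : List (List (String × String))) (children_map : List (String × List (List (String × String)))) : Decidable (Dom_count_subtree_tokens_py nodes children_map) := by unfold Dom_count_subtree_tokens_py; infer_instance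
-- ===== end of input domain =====

-- B replaces A's recursive descent by an iterative traversal with an explicit worklist stack
-- (objective: alternative decomposition, same cost); return values agree on Pre_ (proved below).

-- ===== PORT A =====
-- shared module helper: estimate_tokens(text) = len(text) // 4 if text else 0
def estimate_tokens_py (text : String) : Int :=
  if text = "" then 0 else PySem.Int.floordiv (PySem.Str.len text) 4

-- node.get("content", "") / node["id"] / children_map.get(k, []) (dict lookups, first match)
def pvContent (n : List (String × String)) : String :=
  PySem.Dict.getD (PySem.Dict.mk n) "content" ""
def pvId (n : List (String × String)) : Option String :=
  PySem.Dict.get? (PySem.Dict.mk n) "id"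
def pvKids (cm : List (String × List (List (String × String)))) (k : String) :
    List (List (String × String)) :=
  PySem.Dict.getD (PySem.Dict.mk cm) k []

-- A's recursion, fuel-bounded (fuel = recursion depth; none = KeyError on node["id"]
-- or depth exhausted, i.e. Python's KeyError / RecursionError; Pre_ excludes both)
def pvCountA (cm : List (String × List (List (String × String)))) :
    Nat → List (List (String × String)) → Int → Option Int
  | _, [], total => some total
  | 0, _ :: _, _ => none
  | fuel + 1, node :: rest, total =>
    let t := total + estimate_tokens_py (pvContent node)
    match pvId node with
    | none => none
    | some nid =>
      let gc := pvKids cm nid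
      if gc ≠ [] then
        match pvCountA cm fuel gc 0 with
        | none => none
        | some s => pvCountA cm (fuel + 1) rest (t + s)
      else pvCountA cm (fuel + 1) rest t
  termination_by f ns _ => (f, ns.length)

def count_subtree_tokens_py (nodes : List (List (String × String))) (children_map : List (String × List (List (String × String)))) : Int :=
  (pvCountA children_map (children_map.length + 1) nodes 0).getD 0

-- ===== PORT B =====
-- fuel bound for the worklist loop: every popped node pushes at most pvW children
def pvW (cm : List (String × List (List (String × String)))) : Nat :=
  cm.foldr (fun p m => max p.2.length m) 0

-- Source B's while-loop: pop from the END of the stack, add the estimate, extend with children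
def pvLoopB (cm : List (String × List (List (String × String)))) :
    Nat → List (List (String × String)) → Int → Option Int
  | 0, stack, total => if stack.isEmpty then some total else none
  | fuel + 1, stack, total =>
    match stack.getLast? with
    | none => some total
    | some node =>
      let t := total + estimate_tokens_py (pvContent node)
      match pvId node with
      | none => none
      | some nid => pvLoopB cm fuel (stack.dropLast ++ pvKids cm nid) t

def count_subtree_tokens_py_alt (nodes : List (List (String × String))) (children_map : List (String × List (List (String × String)))) : Int :=
  (pvLoopB children_map
    (nodes.length * (pvW children_map + 1) ^ (children_map.length + 1)) nodes 0).getD 0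

-- ===== PRECONDITION & SPEC =====
-- key graph of children_map: successors of key k are the ids of the nodes in its value
def pvSuccs (cm : List (String × List (List (String × String)))) (k : String) : List String :=
  (pvKids cm k).filterMap pvId
-- pvReach cm j a b = "b is reachable from a in exactly j id-steps"
def pvReach (cm : List (String × List (List (String × String)))) :
    Nat → String → String → Bool
  | 0, a, b => a == b
  | j + 1, a, b => (pvSuccs cm a).any (fun c => pvReach cm j c b)
-- pvRootReach j k = "key k is reachable in j steps from the id of some node in nodes"
def pvRootReach (nodes : List (List (String × String)))
    (cm : List (String × List (List (String × String)))) (j : Nat) (k : String) : Bool :=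
  nodes.any (fun n => match pvId n with
    | some k0 => pvReach cm j k0 k
    | none => false)

-- Pre_ excludes exactly the inputs where Python A raises: KeyError (a node without an
-- "id" key in `nodes` or in the children of a key reachable from `nodes`) and
-- RecursionError (a key cycle reachable from `nodes`); Python B diverges on the latter.
def Pre_count_subtree_tokens_py (nodes : List (List (String × String))) (children_map : List (String × List (List (String × String)))) : Prop :=
  (∀ n ∈ nodes, (pvId n).isSome) ∧
  (∀ k ∈ children_map.map Prod.fst,
      (∃ j ∈ List.range (children_map.length + 1), pvRootReach nodes children_map j k) →
      (∀ n ∈ pvKids children_map k, (pvId n).isSome)) ∧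
  (∀ k ∈ children_map.map Prod.fst,
      (∃ j ∈ List.range (children_map.length + 1), pvRootReach nodes children_map j k) →
      (∀ j ∈ List.range children_map.length, ¬ pvReach children_map (j + 1) k k))
instance (nodes : List (List (String × String))) (children_map : List (String × List (List (String × String)))) : Decidable (Pre_count_subtree_tokens_py nodes children_map) := by unfold Pre_count_subtree_tokens_py; infer_instance

def pvWitness_count_subtree_tokens_py : (List (List (String × String))) × (List (String × List (List (String × String)))) :=
  ([[("id", "a"), ("content", "hello world!")]],
   [("a", [[("id", "b"), ("content", "abcdefgh")]])])

def Spec_count_subtree_tokens_py (nodes : List (List (String × String))) (children_map : List (String × List (List (String × String)))) (out : Int) : Prop := out = count_subtree_tokens_py_alt nodes children_map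
instance (nodes : List (List (String × String))) (children_map : List (String × List (List (String × String)))) (out : Int) : Decidable (Spec_count_subtree_tokens_py nodes children_map out) := by unfold Spec_count_subtree_tokens_py; infer_instance

-- ===== CLAIM (what is proved, stated in full; the proofs are below) =====
def Claim_equal_count_subtree_tokens_py : Prop := ∀ (nodes : List (List (String × String))) (children_map : List (String × List (List (String × String)))), Dom_count_subtree_tokens_py nodes children_map → Pre_count_subtree_tokens_py nodes children_map → Spec_count_subtree_tokens_py nodes children_map (count_subtree_tokens_py nodes children_map)

-- ===== LEMMAS AND PROOFS =====

-- value of pvCountA shifts linearly with the accumulator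
theorem pvCountA_map (cm : List (String × List (List (String × String))))
    (f : Nat) (ns : List (List (String × String))) (t : Int) :
    pvCountA cm f ns t = (pvCountA cm f ns 0).map (t + ·) := by
  match f, ns with
  | f, [] => simp [pvCountA]
  | 0, n :: rest => simp [pvCountA]
  | f + 1, n :: rest =>
    simp only [pvCountA]
    cases hid : pvId n with
    | none => rfl
    | some nid =>
      simp only
      by_cases hgc : pvKids cm nid = []
      · simp only [hgc, ne_eq, not_true_eq_false, if_false]
        rw [pvCountA_map cm (f + 1) rest (t + estimate_tokens_py (pvContent n)),
            pvCountA_map cm (f + 1) rest (0 + estimate_tokens_py (pvContent n))]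
        cases pvCountA cm (f + 1) rest 0 <;> simp <;> ring
      · simp only [ne_eq, hgc, not_false_eq_true, if_true]
        cases hc : pvCountA cm f (pvKids cm nid) 0 with
        | none => rfl
        | some s =>
          simp only
          rw [pvCountA_map cm (f + 1) rest (t + estimate_tokens_py (pvContent n) + s),
              pvCountA_map cm (f + 1) rest (0 + estimate_tokens_py (pvContent n) + s)]
          cases pvCountA cm (f + 1) rest 0 <;> simp <;> ring
  termination_by (f, ns.length)

-- the worklist loop is monotone in its fuel
theorem pvLoopB_mono (cm : List (String × List (List (String × String))))
    (g : Nat) : ∀ (g' : Nat) (st : List (List (String × String))) (t r : Int),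
    g ≤ g' → pvLoopB cm g st t = some r → pvLoopB cm g' st t = some r := by
  induction g with
  | zero =>
    intro g' st t r _ h
    simp only [pvLoopB] at h
    split at h
    · rename_i he
      cases g' <;> simp [pvLoopB, List.isEmpty_iff.mp he] at * <;> simpa using h
    · exact absurd h (by simp)
  | succ g ih =>
    intro g' st t r hle h
    obtain ⟨g'', rfl⟩ : ∃ g'', g' = g'' + 1 := ⟨g' - 1, by omega⟩
    simp only [pvLoopB] at h ⊢
    cases hl : st.getLast? with
    | none => simpa [hl] using (by simpa [hl] using h)
    | some node =>
      simp only [hl] at h ⊢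
      cases hid : pvId node with
      | none => simp [hid] at h
      | some nid =>
        simp only [hid] at h ⊢
        exact ih g'' _ _ _ (by omega) h

-- every children list is at most pvW long
theorem pvKids_len_le (cm : List (String × List (List (String × String)))) (k : String) :
    (pvKids cm k).length ≤ pvW cm := by
  induction cm with
  | nil => simp [pvKids, pvW, PySem.Dict.getD, PySem.Dict.get?]
  | cons p rest ih =>
    obtain ⟨k', v⟩ := p
    simp only [pvKids, PySem.Dict.getD_eq_get?_getD, PySem.Dict.get?_mk_cons, pvW,
      List.foldr_cons] at *
    by_cases h : k' == k
    · simp [h]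
    · simp only [Bool.not_eq_true] at h
      simp only [h, Bool.false_eq_true, if_false]
      exact ih.trans (le_max_right _ _)

-- the bridge: if A's recursion returns s from ns, the worklist loop consumes
-- (pre ++ ns) down to pre while adding exactly s - total to the running total
theorem pvBridge (cm : List (String × List (List (String × String))))
    (f : Nat) (ns : List (List (String × String))) :
    ∀ (total s : Int) (pre : List (List (String × String))) (g : Nat) (r : Int),
    pvCountA cm f ns total = some s →
    pvLoopB cm g pre s = some r →
    pvLoopB cm (g + ns.length * (pvW cm + 1) ^ f) (pre ++ ns) total = some r := by
  match f, ns with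
  | f, [] =>
    intro total s pre g r hA hL
    simp only [pvCountA, Option.some.injEq] at hA
    subst hA
    simpa using hL
  | 0, n :: rest =>
    intro total s pre g r hA hL
    simp [pvCountA] at hA
  | f + 1, n :: rest =>
    intro total s pre g r hA hL
    simp only [pvCountA] at hA
    cases hid : pvId n with
    | none => rw [hid] at hA; exact absurd hA (by simp)
    | some nid =>
      rw [hid] at hA
      simp only at hA
      have hpow : 1 ≤ (pvW cm + 1) ^ (f + 1) := Nat.one_le_pow _ _ (by omega)
      by_cases hgc : pvKids cm nid = []
      · rw [if_neg (by simp [hgc])] at hA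
        rw [pvCountA_map] at hA
        cases hbase : pvCountA cm (f + 1) rest 0 with
        | none => rw [hbase] at hA; exact absurd hA (by simp)
        | some s0 =>
          rw [hbase] at hA
          simp only [Option.map_some, Option.some.injEq] at hA
          -- step: popping n from pre ++ [n] leads back to pre with total s
          have hstep : pvLoopB cm (g + 1) (pre ++ [n]) (total + s0) = some r := by
            simp only [pvLoopB, List.getLast?_concat, List.dropLast_concat, hid, hgc,
              List.append_nil]
            have : total + s0 + estimate_tokens_py (pvContent n) = s := by omega
            rw [this]; exact hL
          have hrest : pvCountA cm (f + 1) rest total = some (total + s0) := by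
            rw [pvCountA_map, hbase]; rfl
          have := pvBridge cm (f + 1) rest total (total + s0) (pre ++ [n]) (g + 1) r hrest hstep
          rw [List.append_assoc, List.singleton_append] at this
          refine pvLoopB_mono cm _ _ _ _ _ (by simp only [List.length_cons]; nlinarith) this
      · rw [if_pos (by simpa using hgc)] at hA
        cases hc : pvCountA cm f (pvKids cm nid) 0 with
        | none => rw [hc] at hA; exact absurd hA (by simp)
        | some sc =>
          rw [hc] at hA
          simp only at hA
          rw [pvCountA_map] at hA
          cases hbase : pvCountA cm (f + 1) rest 0 with
          | none => rw [hbase] at hA; exact absurd hA (by simp)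
          | some s0 =>
            rw [hbase] at hA
            simp only [Option.map_some, Option.some.injEq] at hA
            set e := estimate_tokens_py (pvContent n) with he
            -- children: consume gc from pre ++ gc down to pre
            have hgcA : pvCountA cm f (pvKids cm nid) (total + s0 + e) = some s := by
              rw [pvCountA_map, hc]
              simp only [Option.map_some, Option.some.injEq]
              omega
            have hkids := pvBridge cm f (pvKids cm nid) (total + s0 + e) s pre g r hgcA hL
            -- step: pop n from pre ++ [n], pushing gc
            have hstep : pvLoopB cm (g + (pvKids cm nid).length * (pvW cm + 1) ^ f + 1)
                (pre ++ [n]) (total + s0) = some r := by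
              simp only [pvLoopB, List.getLast?_concat, List.dropLast_concat, hid]
              exact hkids
            have hrest : pvCountA cm (f + 1) rest total = some (total + s0) := by
              rw [pvCountA_map, hbase]; rfl
            have hfin := pvBridge cm (f + 1) rest total (total + s0) (pre ++ [n])
              (g + (pvKids cm nid).length * (pvW cm + 1) ^ f + 1) r hrest hstep
            rw [List.append_assoc, List.singleton_append] at hfin
            refine pvLoopB_mono cm _ _ _ _ _ ?_ hfin
            simp only [List.length_cons]
            have hk : (pvKids cm nid).length * (pvW cm + 1) ^ f ≤ pvW cm * (pvW cm + 1) ^ f :=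
              Nat.mul_le_mul_right _ (pvKids_len_le cm nid)
            have h1 : 1 ≤ (pvW cm + 1) ^ f := Nat.one_le_pow _ _ (by omega)
            have hp : (pvW cm + 1) ^ (f + 1) = (pvW cm + 1) ^ f * (pvW cm + 1) := pow_succ _ _
            nlinarith
  termination_by (f, ns.length)



-- ---- adequacy: under Pre_, A's recursion never runs out of fuel and never hits a missing id ----

def pvEdge (cm : List (String × List (List (String × String)))) (a b : String) : Prop :=
  ∃ n ∈ pvKids cm a, pvId n = some b

def pvLinked (cm : List (String × List (List (String × String)))) :
    String → List String → Prop
  | _, [] => True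
  | a, b :: bs => pvEdge cm a b ∧ pvLinked cm b bs

def pvChainFrom (cm : List (String × List (List (String × String))))
    (ns : List (List (String × String))) : List String → Prop
  | [] => True
  | k :: ks => (∃ n ∈ ns, pvId n = some k) ∧ pvLinked cm k ks

def pvBadLast (cm : List (String × List (List (String × String)))) :
    List String → Prop
  | [] => False
  | k :: ks => ∃ n ∈ pvKids cm ((k :: ks).getLast (by simp)), pvId n = none

-- why pvCountA returned none: a missing id right here, or a descent chain
theorem pvNoneCause (cm : List (String × List (List (String × String))))
    (f : Nat) (ns : List (List (String × String))) :
    ∀ total : Int, pvCountA cm f ns total = none →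
    (∃ n ∈ ns, pvId n = none) ∨
    ∃ c : List String, pvChainFrom cm ns c ∧
      ((c.length = f ∧ ∀ a ∈ c, pvKids cm a ≠ []) ∨ (pvBadLast cm c ∧ c.length ≤ f)) := by
  match f, ns with
  | f, [] => intro total h; simp [pvCountA] at h
  | 0, n :: rest =>
    intro total h
    right
    exact ⟨[], trivial, Or.inl ⟨rfl, by simp⟩⟩
  | f + 1, n :: rest =>
    intro total h
    simp only [pvCountA] at h
    cases hid : pvId n with
    | none => exact Or.inl ⟨n, List.mem_cons_self, hid⟩
    | some nid =>
      rw [hid] at h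
      simp only at h
      by_cases hgc : pvKids cm nid = []
      · rw [if_neg (by simp [hgc])] at h
        rcases pvNoneCause cm (f + 1) rest _ h with ⟨n', hn', hid'⟩ | ⟨c, hch, hcs⟩
        · exact Or.inl ⟨n', List.mem_cons_of_mem _ hn', hid'⟩
        · refine Or.inr ⟨c, ?_, hcs⟩
          cases c with
          | nil => trivial
          | cons k ks => exact ⟨⟨hch.1.choose, List.mem_cons_of_mem _ hch.1.choose_spec.1,
              hch.1.choose_spec.2⟩, hch.2⟩
      · rw [if_pos (by simpa using hgc)] at h
        cases hc : pvCountA cm f (pvKids cm nid) 0 with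
        | none =>
          rcases pvNoneCause cm f (pvKids cm nid) 0 hc with ⟨n', hn', hid'⟩ | ⟨c, hch, hcs⟩
          · refine Or.inr ⟨[nid], ⟨⟨n, List.mem_cons_self, hid⟩, trivial⟩,
              Or.inr ⟨⟨n', by simpa using hn', hid'⟩, by simp⟩⟩
          · refine Or.inr ⟨nid :: c, ⟨⟨n, List.mem_cons_self, hid⟩, ?_⟩, ?_⟩
            · cases c with
              | nil => trivial
              | cons k1 ks =>
                exact ⟨⟨hch.1.choose, hch.1.choose_spec.1, hch.1.choose_spec.2⟩, hch.2⟩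
            · rcases hcs with ⟨hlen, hkids⟩ | ⟨hbad, hlen⟩
              · refine Or.inl ⟨by simp [hlen], ?_⟩
                intro a ha
                rcases List.mem_cons.mp ha with rfl | ha
                · exact hgc
                · exact hkids a ha
              · refine Or.inr ⟨?_, by simp; omega⟩
                cases c with
                | nil => exact absurd hbad (by simp [pvBadLast])
                | cons k1 ks =>
                  simp only [pvBadLast, List.getLast_cons_cons] at hbad ⊢
                  exact hbad
        | some sc =>
          rw [hc] at h
          simp only at h
          rcases pvNoneCause cm (f + 1) rest _ h with ⟨n', hn', hid'⟩ | ⟨c, hch, hcs⟩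
          · exact Or.inl ⟨n', List.mem_cons_of_mem _ hn', hid'⟩
          · refine Or.inr ⟨c, ?_, hcs⟩
            cases c with
            | nil => trivial
            | cons k ks => exact ⟨⟨hch.1.choose, List.mem_cons_of_mem _ hch.1.choose_spec.1,
                hch.1.choose_spec.2⟩, hch.2⟩
  termination_by (f, ns.length)

theorem pvLinked_suffix (cm : List (String × List (List (String × String)))) :
    ∀ (u : List String) (a : String) (v : List String) (k : String),
    pvLinked cm k (u ++ a :: v) → pvLinked cm a v := by
  intro u
  induction u with
  | nil => intro a v k h; exact h.2
  | cons x u ih => intro a v k h; exact ih a v x h.2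

theorem pvLinked_reach (cm : List (String × List (List (String × String)))) :
    ∀ (w : List String) (a a' : String) (z : List String),
    pvLinked cm a (w ++ a' :: z) → pvReach cm (w.length + 1) a a' = true := by
  intro w
  induction w with
  | nil =>
    intro a a' z h
    simp only [List.nil_append] at h
    obtain ⟨⟨n, hn, hidn⟩, _⟩ := h
    have hr : pvReach cm (0 + 1) a a'
        = (pvSuccs cm a).any (fun c => pvReach cm 0 c a') := rfl
    simp only [List.length_nil, hr, List.any_eq_true]
    exact ⟨a', List.mem_filterMap.mpr ⟨n, hn, hidn⟩, by simp [pvReach]⟩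
  | cons x w ih =>
    intro a a' z h
    obtain ⟨⟨n, hn, hidn⟩, hlink⟩ := h
    have hr : pvReach cm (w.length + 1 + 1) a a'
        = (pvSuccs cm a).any (fun c => pvReach cm (w.length + 1) c a') := rfl
    simp only [List.length_cons, hr, List.any_eq_true]
    exact ⟨x, List.mem_filterMap.mpr ⟨n, hn, hidn⟩, ih x a' z hlink⟩

theorem pvKids_ne_nil_mem_keys (cm : List (String × List (List (String × String))))
    (k : String) (h : pvKids cm k ≠ []) : k ∈ cm.map Prod.fst := by
  by_contra hk
  have : PySem.Dict.get? (PySem.Dict.mk cm) k = none := by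
    rw [PySem.Dict.get?_eq_none_iff_not_mem_keys]
    simpa using hk
  exact h (by simp [pvKids, PySem.Dict.getD_eq_get?_getD, this])

-- root reachability of every chain position
theorem pvChain_root (nodes : List (List (String × String)))
    (cm : List (String × List (List (String × String))))
    (c1 : List String) (a : String) (c2 : List String)
    (hch : pvChainFrom cm nodes (c1 ++ a :: c2)) :
    pvRootReach nodes cm c1.length a = true := by
  cases c1 with
  | nil =>
    obtain ⟨⟨n, hn, hidn⟩, _⟩ := hch
    simp only [pvRootReach, List.any_eq_true]
    exact ⟨n, hn, by rw [hidn]; simp [pvReach]⟩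
  | cons k0 u =>
    obtain ⟨⟨n, hn, hidn⟩, hlink⟩ := hch
    simp only [pvRootReach, List.any_eq_true]
    exact ⟨n, hn, by rw [hidn]; simpa using pvLinked_reach cm u k0 a c2 hlink⟩

-- a non-nodup list splits around a duplicated element
theorem pvSplitDup {α : Type} [DecidableEq α] :
    ∀ (l : List α), ¬ l.Nodup → ∃ (u : List α) (a : α) (v w : List α),
      l = u ++ a :: (v ++ a :: w) := by
  intro l
  induction l with
  | nil => intro h; exact absurd List.nodup_nil h
  | cons x t ih =>
    intro h
    by_cases hx : x ∈ t
    · obtain ⟨v, w, rfl⟩ := List.append_of_mem hx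
      exact ⟨[], x, v, w, by simp⟩
    · have : ¬ t.Nodup := fun hn => h (List.nodup_cons.mpr ⟨hx, hn⟩)
      obtain ⟨u, a, v, w, rfl⟩ := ih this
      exact ⟨x :: u, a, v, w, by simp⟩

-- a nodup list of members of l is no longer than l
theorem pvNodupLen {α : Type} [DecidableEq α] (c l : List α)
    (hn : c.Nodup) (hs : ∀ a ∈ c, a ∈ l) : c.length ≤ l.length := by
  calc c.length = c.toFinset.card := (List.toFinset_card_of_nodup hn).symm
    _ ≤ l.toFinset.card := Finset.card_le_card (fun a ha => by
        simp only [List.mem_toFinset] at *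
        exact hs a ha)
    _ ≤ l.length := l.toFinset_card_le

theorem pvAdequate (nodes : List (List (String × String)))
    (cm : List (String × List (List (String × String))))
    (hpre : Pre_count_subtree_tokens_py nodes cm) :
    pvCountA cm (cm.length + 1) nodes 0 ≠ none := by
  intro h
  obtain ⟨h1, h2, h3⟩ := hpre
  rcases pvNoneCause cm (cm.length + 1) nodes 0 h with ⟨n, hn, hid⟩ | ⟨c, hch, hcs⟩
  · have := h1 n hn
    simp [hid] at this
  rcases hcs with ⟨hlen, hkids⟩ | ⟨hbad, hlen⟩
  · -- fuel-exhausting descent chain: forces a reachable key cycle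
    have hsub : ∀ a ∈ c, a ∈ cm.map Prod.fst :=
      fun a ha => pvKids_ne_nil_mem_keys cm a (hkids a ha)
    have hnd : ¬ c.Nodup := fun hnd => by
      have := pvNodupLen c (cm.map Prod.fst) hnd hsub
      rw [hlen, List.length_map] at this
      omega
    obtain ⟨u, a, v, w, hcsplit⟩ := pvSplitDup c hnd
    subst hcsplit
    simp only [List.length_append, List.length_cons] at hlen
    -- the cycle a →^(v.length+1) a
    have hcyc : pvReach cm (v.length + 1) a a = true := by
      rcases u with _ | ⟨k0, u'⟩
      · exact pvLinked_reach cm v a a w hch.2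
      · exact pvLinked_reach cm v a a w
          (pvLinked_suffix cm u' a (v ++ a :: w) k0 hch.2)
    -- a is a reachable key, so Pre_'s acyclicity applies
    have hmem : a ∈ cm.map Prod.fst := hsub a (by simp)
    have hroot : pvRootReach nodes cm u.length a = true :=
      pvChain_root nodes cm u a (v ++ a :: w) hch
    have := h3 a hmem ⟨u.length, List.mem_range.mpr (by omega), hroot⟩
      v.length (List.mem_range.mpr (by omega))
    exact this hcyc
  · -- a reachable node without an "id" key
    rcases c with _ | ⟨k0, ks⟩
    · exact hbad
    obtain ⟨n, hn, hidn⟩ := hbad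
    set klast := (k0 :: ks).getLast (by simp) with hkl
    have hknil : pvKids cm klast ≠ [] := fun hnil => by rw [hnil] at hn; simp at hn
    have hmem : klast ∈ cm.map Prod.fst := pvKids_ne_nil_mem_keys cm klast hknil
    have hsplit : (k0 :: ks).dropLast ++ klast :: [] = k0 :: ks := by
      simpa using List.dropLast_append_getLast (l := k0 :: ks) (by simp)
    have hroot : pvRootReach nodes cm (k0 :: ks).dropLast.length klast = true :=
      pvChain_root nodes cm (k0 :: ks).dropLast klast []
        (by rw [hsplit]; exact hch)
    have hjlt : (k0 :: ks).dropLast.length < cm.length + 1 := by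
      simp only [List.length_dropLast, List.length_cons]
      simp only [List.length_cons] at hlen
      omega
    have := h2 klast hmem ⟨(k0 :: ks).dropLast.length, List.mem_range.mpr hjlt, hroot⟩ n hn
    simp [hidn] at this

-- ===== VERDICT (by name: the statement is the Claim_ definition above) =====
theorem count_subtree_tokens_py_spec : Claim_equal_count_subtree_tokens_py := by
  intro nodes cm _ hpre
  unfold Spec_count_subtree_tokens_py count_subtree_tokens_py count_subtree_tokens_py_alt
  cases h : pvCountA cm (cm.length + 1) nodes 0 with
  | none => exact absurd h (pvAdequate nodes cm hpre)
  | some s =>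
    have hL : pvLoopB cm 0 [] s = some s := by simp [pvLoopB]
    have hb := pvBridge cm (cm.length + 1) nodes 0 s [] 0 s h hL
    simp only [List.nil_append, Nat.zero_add] at hb
    rw [hb]
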